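-- pv_equiv track=rewrite | github.com/srmani835/Inueron_Preplacement | Python/Python_Q1.py | highest_frequency_word_length
-- ===== SOURCE A (Python) =====
-- def highest_frequency_word_length(string):
--     words = string.split()
--
--     word_freq = {}
--
--     for word in words:
--         word_freq[word] = word_freq.get(word, 0) + 1
--
--     max_freq = 0
--     max_length = 0
--     for word, freq in word_freq.items():
--         if freq > max_freq or (freq == max_freq and len(word) > max_length):
--             max_freq = freq
--             max_length = len(word)
--
--     return max_length
-- ===== SOURCE B (Python) =====
-- def highest_frequency_word_length(string):
--     words = string.split()
--     if not words:
--         return 0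
--     top = max(map(words.count, words))
--     return max(len(w) for w in words if words.count(w) == top)
-- ===== Notes on version B (the rewrite author's own statement) =====
-- stated objective: simpler
-- what changed: Replaces the dict-building loop and the fused running-max loop with a compound condition by two clean stages: top = max of per-occurrence counts, then max word length among words whose count equals top (empty input guarded by an early return 0).
import Mathlib
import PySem

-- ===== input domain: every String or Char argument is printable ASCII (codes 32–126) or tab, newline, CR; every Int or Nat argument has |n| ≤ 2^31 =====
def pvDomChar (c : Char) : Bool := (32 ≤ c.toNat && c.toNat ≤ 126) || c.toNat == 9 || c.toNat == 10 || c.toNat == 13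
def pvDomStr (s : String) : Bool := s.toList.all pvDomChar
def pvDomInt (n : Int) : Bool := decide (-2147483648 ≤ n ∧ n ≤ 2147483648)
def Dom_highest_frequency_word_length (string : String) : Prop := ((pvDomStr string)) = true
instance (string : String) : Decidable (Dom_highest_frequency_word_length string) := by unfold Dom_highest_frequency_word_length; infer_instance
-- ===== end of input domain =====

-- B replaces A's dict-building loop and fused running-max loop (compound condition) by two clean
-- stages — max count first, then max length among the most frequent words — same values everywhere.

-- ===== PORT A =====
def highest_frequency_word_length (string : String) : Int :=
  let words := PySem.Str.split₀ string
  let word_freq := words.foldl (fun d word => d.insert word (d.getD word 0 + 1))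
      (PySem.Dict.empty : PySem.Dict String Int)
  (word_freq.items.foldl
    (fun (st : Int × Int) wf =>
      if wf.2 > st.1 ∨ (wf.2 = st.1 ∧ PySem.Str.len wf.1 > st.2) then (wf.2, PySem.Str.len wf.1)
      else st) (0, 0)).2

-- ===== PORT B =====
def highest_frequency_word_length_alt (string : String) : Int :=
  match PySem.Str.split₀ string with
  | [] => 0
  | w0 :: rest =>
    let top : Int := (rest.map (fun w => (PySem.List.count (w0 :: rest) w : Int))).foldl max
        (PySem.List.count (w0 :: rest) w0 : Int)
    match (w0 :: rest).filterMap (fun w =>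
        if (PySem.List.count (w0 :: rest) w : Int) = top then some (PySem.Str.len w) else none) with
    | [] => 0   -- unreachable: some word attains the maximal count
    | h :: t => t.foldl max h

-- ===== PRECONDITION & SPEC =====
def Spec_highest_frequency_word_length (string : String) (out : Int) : Prop := out = highest_frequency_word_length_alt string
instance (string : String) (out : Int) : Decidable (Spec_highest_frequency_word_length string out) := by unfold Spec_highest_frequency_word_length; infer_instance

-- ===== CLAIM (what is proved, stated in full; the proofs are below) =====
def Claim_equal_highest_frequency_word_length : Prop := ∀ (string : String), Dom_highest_frequency_word_length string → Spec_highest_frequency_word_length string (highest_frequency_word_length string)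

-- ===== LEMMAS AND PROOFS =====

-- A's fused step, and the two quantities it maintains over a pair list
def pvStep (st : Int × Int) (wf : String × Int) : Int × Int :=
  if wf.2 > st.1 ∨ (wf.2 = st.1 ∧ PySem.Str.len wf.1 > st.2) then (wf.2, PySem.Str.len wf.1) else st

def pvM (L : List (String × Int)) : Int := L.foldl (fun a p => max a p.2) 0

def pvLm (L : List (String × Int)) (m : Int) : Int :=
  L.foldl (fun a p => if p.2 = m then max a (PySem.Str.len p.1) else a) 0

theorem pvLm_aux (L : List (String × Int)) (m a : Int) :
    a ≤ L.foldl (fun a p => if p.2 = m then max a (PySem.Str.len p.1) else a) a ∧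
    ∀ q ∈ L, q.2 = m → PySem.Str.len q.1 ≤ L.foldl (fun a p => if p.2 = m then max a (PySem.Str.len p.1) else a) a := by
  induction L generalizing a with
  | nil => simp
  | cons p T ih =>
    simp only [List.foldl_cons, List.mem_cons]
    constructor
    · refine le_trans ?_ (ih (if p.2 = m then max a (PySem.Str.len p.1) else a)).1
      split <;> simp
    · rintro q (rfl | hq) hm
      · refine le_trans ?_ (ih _).1
        simp [hm]
      · exact (ih _).2 q hq hm

theorem pvLm_mem (L : List (String × Int)) (m a : Int) :
    L.foldl (fun a p => if p.2 = m then max a (PySem.Str.len p.1) else a) a = a ∨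
    ∃ q ∈ L, q.2 = m ∧ L.foldl (fun a p => if p.2 = m then max a (PySem.Str.len p.1) else a) a = PySem.Str.len q.1 := by
  induction L generalizing a with
  | nil => simp
  | cons p T ih =>
    simp only [List.foldl_cons]
    by_cases h : p.2 = m
    · rcases ih (if p.2 = m then max a (PySem.Str.len p.1) else a) with h2 | ⟨q, hq, hm, he⟩
      · rw [h2]
        simp only [h, if_true]
        rcases max_cases a (PySem.Str.len p.1) with ⟨he, _⟩ | ⟨he, _⟩
        · exact Or.inl he
        · exact Or.inr ⟨p, by simp, h, he⟩
      · exact Or.inr ⟨q, by simp [hq], hm, he⟩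
    · rcases ih (if p.2 = m then max a (PySem.Str.len p.1) else a) with h2 | ⟨q, hq, hm, he⟩
      · rw [h2]; simp [h]
      · exact Or.inr ⟨q, by simp [hq], hm, he⟩

theorem pvLm_eq_zero (L : List (String × Int)) (m : Int) (h : ∀ q ∈ L, q.2 ≠ m) : pvLm L m = 0 := by
  unfold pvLm
  induction L with
  | nil => simp
  | cons p T ih =>
    simp only [List.foldl_cons, h p (by simp), if_false]
    exact ih (fun q hq => h q (by simp [hq]))

theorem pvM_bounds (L : List (String × Int)) : 0 ≤ pvM L ∧ ∀ q ∈ L, q.2 ≤ pvM L := by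
  unfold pvM
  exact ⟨(PySem.List.le_foldl_max_int L (fun p => p.2) 0).1,
    fun q hq => (PySem.List.le_foldl_max_int L (fun p => p.2) 0).2 q hq⟩

theorem pvM_mem_aux (L : List (String × Int)) (a : Int) :
    L.foldl (fun x p => max x p.2) a = a ∨ ∃ q ∈ L, L.foldl (fun x p => max x p.2) a = q.2 := by
  induction L generalizing a with
  | nil => simp
  | cons p T ih =>
    simp only [List.foldl_cons]
    rcases ih (max a p.2) with h2 | ⟨q, hq, he⟩
    · rw [h2]
      rcases max_cases a p.2 with ⟨he, _⟩ | ⟨he, _⟩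
      · exact Or.inl he
      · exact Or.inr ⟨p, by simp, he⟩
    · exact Or.inr ⟨q, by simp [hq], he⟩

-- the fused loop computes (max frequency, max length among the pairs carrying it)
theorem pvFused (L : List (String × Int)) : L.foldl pvStep (0, 0) = (pvM L, pvLm L (pvM L)) := by
  induction L using List.reverseRecOn with
  | nil => simp [pvM, pvLm]
  | append_singleton T p ih =>
    have hM : pvM (T ++ [p]) = max (pvM T) p.2 := by simp [pvM]
    have hLm : ∀ m, pvLm (T ++ [p]) m =
        if p.2 = m then max (pvLm T m) (PySem.Str.len p.1) else pvLm T m := by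
      intro m; simp [pvLm]
    have hlen : (0 : Int) ≤ PySem.Str.len p.1 := by
      rw [PySem.Str.len_eq]; exact Int.natCast_nonneg _
    rw [List.foldl_append, ih]
    simp only [List.foldl_cons, List.foldl_nil]
    rw [hM, hLm]
    unfold pvStep
    dsimp only
    rcases lt_trichotomy (pvM T) p.2 with hc | hc | hc
    · -- p.2 strictly bigger: new champion
      have hnz : ∀ q ∈ T, q.2 ≠ p.2 := fun q hq he =>
        absurd ((pvM_bounds T).2 q hq) (by omega)
      have hz : pvLm T p.2 = 0 := pvLm_eq_zero T p.2 hnz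
      rw [if_pos (Or.inl hc), max_eq_right (le_of_lt hc), if_pos rfl, hz, max_eq_right hlen]
    · -- equal frequency: take the longer word
      rw [← hc, max_self, if_pos rfl]
      rcases le_or_gt (PySem.Str.len p.1) (pvLm T (pvM T)) with hl | hl
      · rw [if_neg (by omega), max_eq_left hl]
      · rw [if_pos (Or.inr ⟨rfl, hl⟩), max_eq_right (le_of_lt hl)]
    · -- smaller frequency: nothing changes
      rw [max_eq_left (le_of_lt hc), if_neg (by omega), if_neg (by omega)]

-- membership in B's filtered length list
theorem pv_mem_filterMap (words : List String) (top x : Int) :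
    x ∈ words.filterMap (fun w =>
        if (PySem.List.count words w : Int) = top then some (PySem.Str.len w) else none) ↔
    ∃ w ∈ words, (List.count w words : Int) = top ∧ x = PySem.Str.len w := by
  simp only [List.mem_filterMap]
  constructor
  · rintro ⟨w, hw, hf⟩
    by_cases h : (PySem.List.count words w : Int) = top
    · rw [if_pos h] at hf
      exact ⟨w, hw, by rw [← PySem.List.count_eq]; exact h, (Option.some_inj.mp hf).symm⟩
    · rw [if_neg h] at hf; exact absurd hf (by simp)
  · rintro ⟨w, hw, hc, rfl⟩
    exact ⟨w, hw, by rw [if_pos (by rw [PySem.List.count_eq]; exact hc)]⟩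

-- ===== VERDICT (by name: the statement is the Claim_ definition above) =====
theorem highest_frequency_word_length_spec : Claim_equal_highest_frequency_word_length := by
  intro string _
  unfold Spec_highest_frequency_word_length
  cases hs : PySem.Str.split₀ string with
  | nil =>
    simp only [highest_frequency_word_length, highest_frequency_word_length_alt, hs]
    rfl
  | cons w0 rest =>
    have hA : highest_frequency_word_length string =
        pvLm ((PySem.Set.ofList (w0 :: rest)).map (fun k => (k, (List.count k (w0 :: rest) : Int))))
          (pvM ((PySem.Set.ofList (w0 :: rest)).map (fun k => (k, (List.count k (w0 :: rest) : Int))))) := by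
      simp only [highest_frequency_word_length, hs,
        PySem.Dict.foldl_insert_getD_add_one_eq_counter, PySem.Dict.items_counter]
      have := pvFused ((PySem.Set.ofList (w0 :: rest)).map (fun k => (k, (List.count k (w0 :: rest) : Int))))
      unfold pvStep at this
      rw [this]
    rw [hA]
    simp only [highest_frequency_word_length_alt, hs]
    set words := w0 :: rest with hwords
    set Lc := (PySem.Set.ofList words).map (fun k => (k, (List.count k words : Int))) with hLc
    have hmemLc : ∀ q : String × Int, q ∈ Lc ↔ ∃ k ∈ words, q = (k, (List.count k words : Int)) := by
      intro q
      simp only [hLc, List.mem_map, PySem.Set.mem_ofList]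
      exact ⟨fun ⟨k, hk, he⟩ => ⟨k, hk, he.symm⟩, fun ⟨k, hk, he⟩ => ⟨k, hk, he.symm⟩⟩
    set f : String → Int := fun w => (PySem.List.count words w : Int) with hf
    set top : Int := (rest.map f).foldl max (f w0) with htop
    have hcnt : ∀ w, f w = (List.count w words : Int) := by
      intro w; rw [hf]; simp [PySem.List.count_eq]
    have htop_ge : ∀ w ∈ words, (List.count w words : Int) ≤ top := by
      intro w hw
      rcases List.mem_cons.mp hw with h' | hw'
      · rw [← hcnt, h']; exact (PySem.List.le_foldl_max (rest.map f) (f w0)).1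
      · rw [← hcnt]
        exact (PySem.List.le_foldl_max (rest.map f) (f w0)).2 (f w)
          (List.mem_map.mpr ⟨w, hw', rfl⟩)
    have htop_mem : ∃ w ∈ words, (List.count w words : Int) = top := by
      rcases PySem.List.foldl_max_mem (rest.map f) (f w0) with h | h
      · exact ⟨w0, by simp [hwords], by rw [← hcnt, htop, h]⟩
      · rcases List.mem_map.mp h with ⟨w, hw, he⟩
        exact ⟨w, by simp [hwords, hw], by rw [← hcnt, htop, he]⟩
    have hMtop : pvM Lc = top := by
      have h1 : pvM Lc ≤ top := by
        rcases pvM_mem_aux Lc 0 with h | ⟨q, hq, he⟩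
        · rcases htop_mem with ⟨w, hw, hc⟩
          have hpos : (1 : Int) ≤ (List.count w words : Int) := by
            exact_mod_cast List.count_pos_iff.mpr hw
          rw [pvM, h]; omega
        · rcases (hmemLc q).mp hq with ⟨k, hk, rfl⟩
          rw [pvM, he]; exact htop_ge k hk
      have h2 : top ≤ pvM Lc := by
        rcases htop_mem with ⟨w, hw, hc⟩
        rw [← hc]
        exact (pvM_bounds Lc).2 (w, (List.count w words : Int)) ((hmemLc _).mpr ⟨w, hw, rfl⟩)
      omega
    rw [hMtop]
    rcases hl : words.filterMap (fun w =>
        if (PySem.List.count words w : Int) = top then some (PySem.Str.len w) else none) with _ | ⟨h, t⟩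
    · exfalso
      rcases htop_mem with ⟨w, hw, hc⟩
      have hmem : PySem.Str.len w ∈ ([] : List Int) := by
        rw [← hl]; exact (pv_mem_filterMap words top _).mpr ⟨w, hw, hc, rfl⟩
      simp at hmem
    · show pvLm Lc top = t.foldl max h
      have hmemB : ∀ x, x ∈ h :: t ↔ ∃ w ∈ words, (List.count w words : Int) = top ∧ x = PySem.Str.len w := by
        intro x; rw [← hl]; exact pv_mem_filterMap words top x
      have hBge : ∀ x ∈ h :: t, x ≤ t.foldl max h := by
        intro x hx
        rcases List.mem_cons.mp hx with rfl | hx'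
        · exact (PySem.List.le_foldl_max t x).1
        · exact (PySem.List.le_foldl_max t h).2 x hx'
      have hBmem : t.foldl max h ∈ h :: t := by
        rcases PySem.List.foldl_max_mem t h with h' | h'
        · rw [h']; simp
        · simp [h']
      have h1 : pvLm Lc top ≤ t.foldl max h := by
        rcases pvLm_mem Lc top 0 with h' | ⟨q, hq, hm, he⟩
        · rw [pvLm, h']
          rcases (hmemB h).mp (by simp) with ⟨w, hw, hc, he⟩
          have h0 : (0 : Int) ≤ h := by rw [he, PySem.Str.len_eq]; exact Int.natCast_nonneg _
          exact le_trans h0 (hBge h (by simp))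
        · rw [pvLm, he]
          rcases (hmemLc q).mp hq with ⟨k, hk, rfl⟩
          exact hBge _ ((hmemB _).mpr ⟨k, hk, hm, rfl⟩)
      have h2 : t.foldl max h ≤ pvLm Lc top := by
        rcases (hmemB (t.foldl max h)).mp hBmem with ⟨w, hw, hc, he⟩
        rw [he]
        exact (pvLm_aux Lc top 0).2 (w, (List.count w words : Int)) ((hmemLc _).mpr ⟨w, hw, rfl⟩) hc
      omega
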